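-- pv_equiv track=rewrite | github.com/cirosantilli/project-euler-solutions | solvers/562.py | best_base_candidates
-- ===== SOURCE A (Python) =====
-- import math
-- from typing import List, Tuple
--
-- def best_base_candidates(
--     xs: List[int], ys: List[int]
-- ) -> Tuple[int, List[Tuple[int, int, int, int]]]:
--     """
--     Find the maximum squared length u2 of u = p(i)+p(j) with i<j and gcd(u.x,u.y)=1.
--     Returns (best_u2, list_of_candidates) where each candidate is (i,j,ux,uy).
--     """
--     m = len(xs)
--     gcd = math.gcd
--
--     best_u2 = -1
--     best: List[Tuple[int, int, int, int]] = []
--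
--     for i in range(m):
--         xi = xs[i]
--         yi = ys[i]
--         for j in range(i + 1, m):
--             ux = xi + xs[j]
--             uy = yi + ys[j]
--             u2 = ux * ux + uy * uy
--
--             if u2 < best_u2:
--                 continue
--
--             # If both are even, gcd>1.
--             if ((ux | uy) & 1) == 0:
--                 continue
--
--             if gcd(ux, uy) != 1:
--                 continue
--
--             if u2 > best_u2:
--                 best_u2 = u2
--                 best = [(i, j, ux, uy)]
--             elif u2 == best_u2:
--                 best.append((i, j, ux, uy))
--
--     if best_u2 < 0:
--         raise RuntimeError("No primitive base found; increase deficit limit.")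
--     return best_u2, best
-- ===== SOURCE B (Python) =====
-- import math
-- from typing import List, Tuple
--
--
-- def best_base_candidates(
--     xs: List[int], ys: List[int]
-- ) -> Tuple[int, List[Tuple[int, int, int, int]]]:
--     """Build the pair sums once, keep the coprime ones, then take the max
--     and the ties in one filter each -- no running best/ties bookkeeping."""
--     m = len(xs)
--     cands = [(i, j, xs[i] + xs[j], ys[i] + ys[j])
--              for i in range(m) for j in range(i + 1, m)]
--     coprime = [c for c in cands if math.gcd(c[2], c[3]) == 1]
--     if not coprime:
--         raise RuntimeError("No primitive base found; increase deficit limit.")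
--     best_u2 = max(c[2] * c[2] + c[3] * c[3] for c in coprime)
--     best = [c for c in coprime if c[2] * c[2] + c[3] * c[3] == best_u2]
--     return best_u2, best
-- ===== Notes on version B (the rewrite author's own statement) =====
-- stated objective: simpler
-- what changed: Replaces the single-pass running-max with reset/append bookkeeping (plus the even/even and u2<best short-circuits) by a declarative pipeline: materialize all pair sums, filter the coprime ones with the plain gcd test, take max() of their squared lengths, and filter the ties.
import Mathlib
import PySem

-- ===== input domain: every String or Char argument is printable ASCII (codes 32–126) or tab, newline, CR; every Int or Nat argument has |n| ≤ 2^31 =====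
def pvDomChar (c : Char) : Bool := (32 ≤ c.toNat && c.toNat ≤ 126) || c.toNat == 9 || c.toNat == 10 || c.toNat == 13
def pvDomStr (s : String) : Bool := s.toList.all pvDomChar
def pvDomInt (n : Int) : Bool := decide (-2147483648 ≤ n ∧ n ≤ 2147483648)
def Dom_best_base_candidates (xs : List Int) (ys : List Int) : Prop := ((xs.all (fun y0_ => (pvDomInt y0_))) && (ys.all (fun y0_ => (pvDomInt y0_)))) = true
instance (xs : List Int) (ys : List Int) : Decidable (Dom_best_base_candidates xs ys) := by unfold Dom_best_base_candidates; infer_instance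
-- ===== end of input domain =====

-- B replaces A's single-pass running-max/reset bookkeeping by a pipeline (all pair sums,
-- filter coprime, max, filter ties); same O(m^2) cost, simpler decomposition.


-- ===== PORT A =====
def best_base_candidates (xs : List Int) (ys : List Int) : Int × (List (Int × Int × Int × Int)) :=
  let m : Int := (xs.length : Int)
  (PySem.List.pyRange 0 m 1).foldl (fun st i =>
    let xi := PySem.List.pyGetD xs i 0
    let yi := PySem.List.pyGetD ys i 0
    (PySem.List.pyRange (i + 1) m 1).foldl (fun st j =>
      let ux := xi + PySem.List.pyGetD xs j 0
      let uy := yi + PySem.List.pyGetD ys j 0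
      let u2 := ux * ux + uy * uy
      if u2 < st.1 then st
      else if PySem.Int.band (PySem.Int.bor ux uy) 1 = 0 then st
      else if Int.gcd ux uy ≠ 1 then st
      else if u2 > st.1 then (u2, [(i, j, ux, uy)])
      else if u2 = st.1 then (st.1, st.2 ++ [(i, j, ux, uy)])
      else st) st)
    ((-1 : Int), ([] : List (Int × Int × Int × Int)))
  -- Python raises RuntimeError when best_u2 < 0 (no coprime pair); those inputs are outside Pre_.

-- ===== PORT B =====
def best_base_candidates_alt (xs : List Int) (ys : List Int) : Int × (List (Int × Int × Int × Int)) :=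
  let m : Int := (xs.length : Int)
  let cands := (PySem.List.pyRange 0 m 1).flatMap (fun i =>
    (PySem.List.pyRange (i + 1) m 1).map (fun j =>
      (i, j, PySem.List.pyGetD xs i 0 + PySem.List.pyGetD xs j 0,
             PySem.List.pyGetD ys i 0 + PySem.List.pyGetD ys j 0)))
  let coprime := cands.filter (fun c => Int.gcd c.2.2.1 c.2.2.2 == 1)
  if coprime.isEmpty then ((-1 : Int), [])  -- Python raises RuntimeError here; outside Pre_
  else
    let best_u2 := (PySem.List.max? (coprime.map (fun c => c.2.2.1 * c.2.2.1 + c.2.2.2 * c.2.2.2)) (fun x => x)).getD 0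
    (best_u2, coprime.filter (fun c => c.2.2.1 * c.2.2.1 + c.2.2.2 * c.2.2.2 == best_u2))

-- ===== PRECONDITION & SPEC =====
-- Pre_ excludes exactly the inputs where Python A raises: IndexError when ys is shorter
-- than xs, and RuntimeError when no pair i<j has coprime coordinate sums.
def Pre_best_base_candidates (xs : List Int) (ys : List Int) : Prop :=
  xs.length ≤ ys.length ∧
  ∃ i < xs.length, ∃ j < xs.length, i < j ∧
    Int.gcd (xs.getD i 0 + xs.getD j 0) (ys.getD i 0 + ys.getD j 0) = 1
instance (xs : List Int) (ys : List Int) : Decidable (Pre_best_base_candidates xs ys) := by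
  unfold Pre_best_base_candidates; infer_instance

def pvWitness_best_base_candidates : List Int × List Int := ([0, 1], [1, 0])

def Spec_best_base_candidates (xs : List Int) (ys : List Int) (out : Int × (List (Int × Int × Int × Int))) : Prop := out = best_base_candidates_alt xs ys
instance (xs : List Int) (ys : List Int) (out : Int × (List (Int × Int × Int × Int))) : Decidable (Spec_best_base_candidates xs ys out) := by unfold Spec_best_base_candidates; infer_instance

-- ===== CLAIM (what is proved, stated in full; the proofs are below) =====
def Claim_equal_best_base_candidates : Prop := ∀ (xs : List Int) (ys : List Int), Dom_best_base_candidates xs ys → Pre_best_base_candidates xs ys → Spec_best_base_candidates xs ys (best_base_candidates xs ys)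

-- ===== LEMMAS AND PROOFS =====

-- Abbreviations for the proof: squared length, coprimality test, A's loop body on a quad.
def pvU2 (c : Int × Int × Int × Int) : Int := c.2.2.1 * c.2.2.1 + c.2.2.2 * c.2.2.2

def pvCop (c : Int × Int × Int × Int) : Bool := Int.gcd c.2.2.1 c.2.2.2 == 1

def pvStep (st : Int × List (Int × Int × Int × Int)) (c : Int × Int × Int × Int) :
    Int × List (Int × Int × Int × Int) :=
  if pvU2 c < st.1 then st
  else if PySem.Int.band (PySem.Int.bor c.2.2.1 c.2.2.2) 1 = 0 then st
  else if Int.gcd c.2.2.1 c.2.2.2 ≠ 1 then st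
  else if pvU2 c > st.1 then (pvU2 c, [c])
  else if pvU2 c = st.1 then (st.1, st.2 ++ [c])
  else st

def pvPairs (xs ys : List Int) : List (Int × Int × Int × Int) :=
  (PySem.List.pyRange 0 (xs.length : Int) 1).flatMap (fun i =>
    (PySem.List.pyRange (i + 1) (xs.length : Int) 1).map (fun j =>
      (i, j, PySem.List.pyGetD xs i 0 + PySem.List.pyGetD xs j 0,
             PySem.List.pyGetD ys i 0 + PySem.List.pyGetD ys j 0)))

def pvBmax (C : List (Int × Int × Int × Int)) : Int :=
  C.foldl (fun a c => max a (pvU2 c)) (-1)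

lemma pvFoldlFlatMap {α β σ : Type} (l : List α) (g : α → List β) (f : σ → β → σ) (init : σ) :
    l.foldl (fun st a => (g a).foldl f st) init = (l.flatMap g).foldl f init := by
  induction l generalizing init with
  | nil => rfl
  | cons x t ih => simp [List.flatMap_cons, List.foldl_append, ih]

-- Port A is the fold of A's loop body over the flattened i<j pair list.
lemma pvA_eq_foldl (xs ys : List Int) :
    best_base_candidates xs ys = (pvPairs xs ys).foldl pvStep ((-1 : Int), []) := by
  unfold best_base_candidates pvPairs
  rw [← pvFoldlFlatMap]
  simp only [List.foldl_map]
  rfl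

-- Parity facts about Python's bitwise shortcut `((ux | uy) & 1) == 0`.
lemma pvNatAndPar (m n : Nat) : (m &&& n) % 2 = if m % 2 = 1 ∧ n % 2 = 1 then 1 else 0 := by
  have t := Nat.testBit_land m n 0
  rw [Bool.eq_iff_iff] at t
  simp only [Nat.testBit_zero, Bool.and_eq_true, decide_eq_true_eq] at t
  split_ifs with hif <;> omega

lemma pvNatOrPar (m n : Nat) (h : (m ||| n) % 2 = 0) : m % 2 = 0 ∧ n % 2 = 0 := by
  have t := Nat.testBit_lor m n 0
  rw [Bool.eq_iff_iff] at t
  simp only [Nat.testBit_zero, Bool.or_eq_true, decide_eq_true_eq] at t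
  omega

lemma pvBandOne (x : Int) : PySem.Int.band x 1 = x % 2 := by
  unfold PySem.Int.band
  split_ifs with h1 h2 h3
  · rw [Int.toNat_one, Nat.and_one_is_mod]; omega
  · norm_num at h2
  · rw [Int.toNat_one, Nat.land_comm, Nat.and_one_is_mod]; omega
  · norm_num at h3

lemma pvBorPar (a b : Int) (h : (PySem.Int.bor a b) % 2 = 0) : a % 2 = 0 ∧ b % 2 = 0 := by
  unfold PySem.Int.bor at h
  split_ifs at h with h1 h2 h3
  · have hn : (a.toNat ||| b.toNat) % 2 = 0 := by omega
    have := pvNatOrPar a.toNat b.toNat hn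
    omega
  · set nb := (-b - 1).toNat with hnb
    set na := a.toNat with hna
    have hle : nb &&& na ≤ nb := Nat.and_le_left
    have hp := pvNatAndPar nb na
    split_ifs at hp <;> omega
  · set na := (-a - 1).toNat with hna
    set nb := b.toNat with hnb
    have hle : na &&& nb ≤ na := Nat.and_le_left
    have hp := pvNatAndPar na nb
    split_ifs at hp <;> omega
  · set na := (-a - 1).toNat with hna
    set nb := (-b - 1).toNat with hnb
    have hp := pvNatAndPar na nb
    split_ifs at hp <;> omega

-- If gcd(a,b) = 1 then the even/even shortcut does not fire.
lemma pvOddOfGcdOne (a b : Int) (h : Int.gcd a b = 1) :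
    ¬ PySem.Int.band (PySem.Int.bor a b) 1 = 0 := by
  intro he
  rw [pvBandOne] at he
  obtain ⟨ha, hb⟩ := pvBorPar a b he
  have hda : (2 : Int) ∣ a := Int.dvd_of_emod_eq_zero ha
  have hdb : (2 : Int) ∣ b := Int.dvd_of_emod_eq_zero hb
  have := Int.dvd_gcd hda hdb
  rw [h] at this
  norm_num at this

lemma pvBmaxSnoc (C : List (Int × Int × Int × Int)) (c : Int × Int × Int × Int) :
    pvBmax (C ++ [c]) = max (pvBmax C) (pvU2 c) := by
  unfold pvBmax; rw [List.foldl_append]; rfl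

lemma pvBmaxIsMax (C : List (Int × Int × Int × Int)) :
    ∀ x ∈ C, pvU2 x ≤ pvBmax C :=
  (PySem.List.le_foldl_max_int C pvU2 (-1)).2

-- Loop invariant for A: the fold returns the max u2 over coprime quads (−1 if none)
-- together with all coprime quads attaining it, in order.
lemma pvInv (P : List (Int × Int × Int × Int)) :
    P.foldl pvStep ((-1 : Int), []) =
      (pvBmax (P.filter pvCop),
       (P.filter pvCop).filter (fun c => pvU2 c == pvBmax (P.filter pvCop))) := by
  induction P using List.reverseRecOn with
  | nil => rfl
  | append_singleton P c ih =>
    rw [List.foldl_append]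
    simp only [List.foldl_cons, List.foldl_nil]
    rw [ih]
    by_cases hc : pvCop c = true
    · have hgcd : Int.gcd c.2.2.1 c.2.2.2 = 1 := by
        simpa [pvCop, beq_iff_eq] using hc
      have hodd := pvOddOfGcdOne c.2.2.1 c.2.2.2 hgcd
      have hfilter : (P ++ [c]).filter pvCop = P.filter pvCop ++ [c] := by
        simp [hc]
      rw [hfilter, pvBmaxSnoc]
      rcases lt_trichotomy (pvU2 c) (pvBmax (P.filter pvCop)) with h | h | h
      · have hmax : max (pvBmax (P.filter pvCop)) (pvU2 c) = pvBmax (P.filter pvCop) :=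
          max_eq_left h.le
        rw [hmax]
        have hne : (pvU2 c == pvBmax (P.filter pvCop)) = false :=
          beq_eq_false_iff_ne.mpr h.ne
        simp [pvStep, h, hne]
      · have hmax : max (pvBmax (P.filter pvCop)) (pvU2 c) = pvBmax (P.filter pvCop) :=
          max_eq_left h.le
        rw [hmax]
        simp [pvStep, h, hodd, hgcd]
      · have hmax : max (pvBmax (P.filter pvCop)) (pvU2 c) = pvU2 c := max_eq_right h.le
        rw [hmax]
        have h1 : ¬ pvU2 c < pvBmax (P.filter pvCop) := by omega
        have hnil : (P.filter pvCop).filter (fun x => pvU2 x == pvU2 c) = [] := by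
          rw [List.filter_eq_nil_iff]
          intro x hx
          have := pvBmaxIsMax (P.filter pvCop) x hx
          simp [beq_iff_eq]; omega
        simp [pvStep, h1, h, hodd, hgcd, hnil]
    · have hg : Int.gcd c.2.2.1 c.2.2.2 ≠ 1 := by
        simpa [pvCop, beq_iff_eq] using hc
      have hfilter : (P ++ [c]).filter pvCop = P.filter pvCop := by
        simp [hc]
      rw [hfilter]
      simp [pvStep, hg]

lemma pvU2_nonneg (c : Int × Int × Int × Int) : 0 ≤ pvU2 c := by
  exact add_nonneg (mul_self_nonneg _) (mul_self_nonneg _)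

-- Port B computes the same pair (max over coprime, its ties).
lemma pvPipe (C : List (Int × Int × Int × Int)) :
    (if C.isEmpty then ((-1 : Int), ([] : List (Int × Int × Int × Int)))
     else ((PySem.List.max? (C.map (fun c => c.2.2.1 * c.2.2.1 + c.2.2.2 * c.2.2.2)) (fun x => x)).getD 0,
           C.filter (fun c => c.2.2.1 * c.2.2.1 + c.2.2.2 * c.2.2.2 ==
             (PySem.List.max? (C.map (fun c => c.2.2.1 * c.2.2.1 + c.2.2.2 * c.2.2.2)) (fun x => x)).getD 0)))
    = (pvBmax C, C.filter (fun c => pvU2 c == pvBmax C)) := by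
  cases C with
  | nil => simp [pvBmax]
  | cons c t =>
    have hmap : (c :: t).map (fun c => c.2.2.1 * c.2.2.1 + c.2.2.2 * c.2.2.2)
        = pvU2 c :: t.map pvU2 := rfl
    have hM : (PySem.List.max? ((c :: t).map (fun c => c.2.2.1 * c.2.2.1 + c.2.2.2 * c.2.2.2))
        (fun x => x)).getD 0 = pvBmax (c :: t) := by
      rw [hmap, PySem.List.max?_id_cons, Option.getD_some, List.foldl_map]
      unfold pvBmax
      simp only [List.foldl_cons]
      congr 1
      have := pvU2_nonneg c
      omega
    simp only [List.isEmpty_cons, Bool.false_eq_true, if_false, hM]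
    rfl

lemma pvB_eq (xs ys : List Int) :
    best_base_candidates_alt xs ys =
      (pvBmax ((pvPairs xs ys).filter pvCop),
       ((pvPairs xs ys).filter pvCop).filter
         (fun c => pvU2 c == pvBmax ((pvPairs xs ys).filter pvCop))) :=
  pvPipe ((pvPairs xs ys).filter pvCop)

-- ===== VERDICT (by name: the statement is the Claim_ definition above) =====
theorem best_base_candidates_spec : Claim_equal_best_base_candidates := by
  intro xs ys _ _
  show best_base_candidates xs ys = best_base_candidates_alt xs ys
  rw [pvA_eq_foldl, pvInv, pvB_eq]
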